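-- pv_equiv track=rewrite | github.com/Pandaemonium/CausalOctonionGraph | calc/sedenion_gen.py | count_witt_triple_orbits_labeled
-- ===== SOURCE A (Python) =====
-- from itertools import permutations
-- from typing import Dict, FrozenSet, List, Set, Tuple
--
-- def find_witt_triples(table: List[List[Tuple[int, int]]]) -> List[Tuple[int, int, int]]:
--     """
--     Return all ordered Witt triples (i, j, k) where i,j,k > 0 are distinct
--     and e_i * e_j = +/-e_k.
--     """
--     dim = len(table)
--     triples = []
--     for i in range(1, dim):
--         for j in range(1, dim):
--             if i == j:
--                 continue
--             sign, k = table[i][j]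
--             if k > 0 and k != i and k != j:
--                 triples.append((i, j, k))
--     return triples
--
-- def get_witt_pair_groups() -> List[List[int]]:
--     """
--     Return the three Witt-pair label groups for the sedenion algebra.
--
--     These are the three sets of imaginary basis indices that form the
--     generation subspaces, partitioning {1..15} into three groups of 5.
--
--     The partition is derived from the algebraic structure of the sedenion
--     Cayley-Dickson construction: the three groups correspond to the three
--     quaternion imaginary subspaces embedded in the sedenion imaginary space.
--
--     Group structure (1-indexed basis):
--       G0 = {1, 2, 3, 4, 5}
--       G1 = {6, 7, 8, 9, 10}
--       G2 = {11, 12, 13, 14, 15}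
--     """
--     return [
--         list(range(1, 6)),    # G0: indices 1-5
--         list(range(6, 11)),   # G1: indices 6-10
--         list(range(11, 16)),  # G2: indices 11-15
--     ]
--
-- def apply_s3_to_index(
--     idx: int,
--     groups: List[List[int]],
--     group_perm: Tuple[int, int, int],
-- ) -> int:
--     """
--     Apply an S3 element (specified as a permutation of group indices) to
--     a basis index.
--
--     The permutation maps group_perm[g] <- g, i.e., elements from group g
--     are sent to the position of group group_perm[g].
--
--     Returns the new basis index after permutation.
--     """
--     if idx == 0:
--         return 0  # real unit is fixed
--
--     for g_idx, group in enumerate(groups):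
--         if idx in group:
--             tgt_g = group_perm[g_idx]
--             pos = group.index(idx)
--             tgt_group = groups[tgt_g]
--             if pos < len(tgt_group):
--                 return tgt_group[pos]
--             return idx  # fallback: fixed
--
--     return idx  # idx not in any group: fixed
--
-- def count_witt_triple_orbits_labeled(table: List[List[Tuple[int, int]]]) -> int:
--     """
--     Count S3 orbits of ordered (labeled) Witt triples under the S3 action
--     that permutes three Witt-pair label groups.
--     """
--     triples = find_witt_triples(table)
--     triple_set = set(triples)
--     groups = get_witt_pair_groups()
--
--     visited: Set[Tuple[int, int, int]] = set()
--     orbit_count = 0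
--
--     for t in triples:
--         if t in visited:
--             continue
--         orbit_count += 1
--         for perm in permutations(range(3)):
--             t_perm = tuple(
--                 apply_s3_to_index(idx, groups, perm) for idx in t
--             )
--             if t_perm in triple_set:
--                 visited.add(t_perm)
--
--     return orbit_count
-- ===== SOURCE B (Python) =====
-- from itertools import permutations
-- from typing import List, Tuple
--
-- def find_witt_triples(table: List[List[Tuple[int, int]]]) -> List[Tuple[int, int, int]]:
--     dim = len(table)
--     triples = []
--     for i in range(1, dim):
--         for j in range(1, dim):
--             if i == j:
--                 continue
--             sign, k = table[i][j]
--             if k > 0 and k != i and k != j: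
--                 triples.append((i, j, k))
--     return triples
--
-- def _act(perm, idx):
--     # S3 action on basis indices: the three label groups are the intervals
--     # 1-5, 6-10, 11-15, so group and position are just divmod(idx-1, 5).
--     if 1 <= idx <= 15:
--         g, pos = divmod(idx - 1, 5)
--         return 5 * perm[g] + pos + 1
--     return idx
--
-- def count_witt_triple_orbits_labeled(table: List[List[Tuple[int, int]]]) -> int:
--     # Canonical-form counting: each orbit is represented by the lexicographic
--     # minimum of the triple's six S3 images; count distinct representatives.
--     canon = set()
--     for t in find_witt_triples(table):
--         canon.add(min(tuple(_act(p, x) for x in t) for p in permutations(range(3))))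
--     return len(canon)
-- ===== Notes on version B (the rewrite author's own statement) =====
-- stated objective: simpler
-- what changed: Replaces the visited-set orbit-marking loop (mark all in-set S3 images of each unvisited triple) with canonical-form counting: each triple maps to the lexicographic minimum of its six S3 images and the function returns the number of distinct such representatives; the arithmetic divmod action replaces the group-list/enumerate/index lookup.
import Mathlib
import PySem

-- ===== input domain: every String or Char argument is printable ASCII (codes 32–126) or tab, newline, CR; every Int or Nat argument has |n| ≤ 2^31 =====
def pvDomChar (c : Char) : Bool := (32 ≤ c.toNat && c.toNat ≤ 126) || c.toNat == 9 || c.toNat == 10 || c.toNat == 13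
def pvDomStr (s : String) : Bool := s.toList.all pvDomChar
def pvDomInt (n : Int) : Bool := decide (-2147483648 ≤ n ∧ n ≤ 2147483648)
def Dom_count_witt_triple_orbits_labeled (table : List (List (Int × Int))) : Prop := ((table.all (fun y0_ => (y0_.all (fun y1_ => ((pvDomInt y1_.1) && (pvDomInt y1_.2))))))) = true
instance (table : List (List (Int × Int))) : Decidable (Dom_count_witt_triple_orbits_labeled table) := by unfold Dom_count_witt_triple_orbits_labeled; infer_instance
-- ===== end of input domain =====

-- B replaces A's visited-set orbit-marking loop by canonical-form counting (lexicographic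
-- minimum of the six S3 images of each triple, collected in a set); objective: simpler.

-- ===== PORT A =====
-- shared module helper find_witt_triples (used by both Pythons)
def findWittTriples (table : List (List (Int × Int))) : List (Int × Int × Int) :=
  (PySem.List.pyRange 1 (table.length : Int) 1).foldl (fun acc i =>
    (PySem.List.pyRange 1 (table.length : Int) 1).foldl (fun acc j =>
      if i = j then acc
      else
        -- table[i][j]: in range under Pre_; pyGetD default is unreachable there
        let c := PySem.List.pyGetD (PySem.List.pyGetD table i []) j (0, 0)
        if c.2 > 0 ∧ c.2 ≠ i ∧ c.2 ≠ j then acc ++ [(i, j, c.2)] else acc) acc) []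

-- get_witt_pair_groups()
def wittGroups : List (List Int) := [[1,2,3,4,5],[6,7,8,9,10],[11,12,13,14,15]]

-- list(permutations(range(3))), evaluated through PySem's itertools.permutations
def perms6 : List (List Int) := PySem.List.permutations ([0,1,2] : List Int) 3

-- apply_s3_to_index: the 'for g_idx, group in enumerate(groups)' loop with early return
def applyS3Aux (idx : Int) (groups : List (List Int)) (perm : List Int) :
    List (Int × List Int) → Int
  | [] => idx                                   -- fell through the loop: idx fixed
  | (gIdx, group) :: rest =>
    if group.contains idx then
      let tgtG := PySem.List.pyGetD perm gIdx 0                 -- group_perm[g_idx]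
      let pos : Int := ((PySem.List.index? group idx).getD 0 : Nat)  -- group.index(idx)
      let tgtGroup := PySem.List.pyGetD groups tgtG []          -- groups[tgt_g]
      if pos < (tgtGroup.length : Int) then PySem.List.pyGetD tgtGroup pos 0
      else idx
    else applyS3Aux idx groups perm rest

def applyS3 (idx : Int) (groups : List (List Int)) (perm : List Int) : Int :=
  if idx = 0 then 0
  else applyS3Aux idx groups perm (PySem.List.enumerate groups 0)

-- the body of A's 'for t in triples' loop, named for the proofs below
def stepA (tripleSet : PySem.Set (Int × Int × Int))
    (st : PySem.Set (Int × Int × Int) × Int) (t : Int × Int × Int) :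
    PySem.Set (Int × Int × Int) × Int :=
  if PySem.Set.contains st.1 t then st
  else
    let cnt := st.2 + 1
    let visited := perms6.foldl (fun v p =>
      let tp := (applyS3 t.1 wittGroups p, applyS3 t.2.1 wittGroups p,
                 applyS3 t.2.2 wittGroups p)
      if PySem.Set.contains tripleSet tp then PySem.Set.add v tp else v) st.1
    (visited, cnt)

def count_witt_triple_orbits_labeled (table : List (List (Int × Int))) : Int :=
  let triples := findWittTriples table
  let tripleSet : PySem.Set (Int × Int × Int) := PySem.Set.ofList triples
  (triples.foldl (stepA tripleSet) (PySem.Set.empty, 0)).2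

-- ===== PORT B =====
-- _act: arithmetic form of the S3 action (groups are the intervals 1-5, 6-10, 11-15)
def s3Act (perm : List Int) (idx : Int) : Int :=
  if 1 ≤ idx ∧ idx ≤ 15 then
    -- g, pos = divmod(idx - 1, 5); divisor 5 ≠ 0, so divmod is total here
    5 * PySem.List.pyGetD perm (PySem.Int.floordiv (idx - 1) 5) 0
      + PySem.Int.mod (idx - 1) 5 + 1
  else idx

-- Python '<' on 3-tuples of ints (lexicographic) — exact on this domain
def lexLt3 (a b : Int × Int × Int) : Bool :=
  a.1 < b.1 || (a.1 == b.1 && (a.2.1 < b.2.1 || (a.2.1 == b.2.1 && a.2.2 < b.2.2)))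

-- Python min() over a nonempty sequence of 3-tuples: keep current unless strictly smaller
def pyMin3 (x : Int × Int × Int) : List (Int × Int × Int) → Int × Int × Int
  | [] => x
  | y :: l => pyMin3 (if lexLt3 y x then y else x) l

-- the six S3 images of a triple (the generator inside min(...))
def s3Images (t : Int × Int × Int) : List (Int × Int × Int) :=
  perms6.map (fun p => (s3Act p t.1, s3Act p t.2.1, s3Act p t.2.2))

def canonOf (t : Int × Int × Int) : Int × Int × Int :=
  match s3Images t with
  | [] => t
  | x :: l => pyMin3 x l

-- the body of B's loop, named for the proofs below
def stepB (s : PySem.Set (Int × Int × Int)) (t : Int × Int × Int) :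
    PySem.Set (Int × Int × Int) :=
  PySem.Set.add s (canonOf t)

def count_witt_triple_orbits_labeled_alt (table : List (List (Int × Int))) : Int :=
  PySem.Set.len ((findWittTriples table).foldl stepB PySem.Set.empty)

-- ===== PRECONDITION & SPEC =====
-- Pre_ excludes exactly the ragged tables on which Python's table[i][j] raises IndexError
-- (both A and B index the same cells); on every other input A returns normally.
def Pre_count_witt_triple_orbits_labeled (table : List (List (Int × Int))) : Prop :=
  ∀ i < table.length, ∀ j < table.length,
    1 ≤ i → 1 ≤ j → j ≠ i → j < (table.getD i []).length
instance (table : List (List (Int × Int))) : Decidable (Pre_count_witt_triple_orbits_labeled table) := by unfold Pre_count_witt_triple_orbits_labeled; infer_instance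

def pvWitness_count_witt_triple_orbits_labeled : (List (List (Int × Int))) :=
  [[(0,0),(0,0),(0,0),(0,0)],
   [(0,0),(0,0),(1,3),(1,2)],
   [(0,0),(-1,3),(0,0),(1,1)],
   [(0,0),(1,2),(-1,1),(0,0)]]

def Spec_count_witt_triple_orbits_labeled (table : List (List (Int × Int))) (out : Int) : Prop := out = count_witt_triple_orbits_labeled_alt table
instance (table : List (List (Int × Int))) (out : Int) : Decidable (Spec_count_witt_triple_orbits_labeled table out) := by unfold Spec_count_witt_triple_orbits_labeled; infer_instance

-- ===== CLAIM (what is proved, stated in full; the proofs are below) =====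
def Claim_equal_count_witt_triple_orbits_labeled : Prop := ∀ (table : List (List (Int × Int))), Dom_count_witt_triple_orbits_labeled table → Pre_count_witt_triple_orbits_labeled table → Spec_count_witt_triple_orbits_labeled table (count_witt_triple_orbits_labeled table)

-- ===== LEMMAS AND PROOFS =====

-- the literal value of perms6
lemma perms6_eq : perms6 = [[0,1,2],[0,2,1],[1,0,2],[1,2,0],[2,0,1],[2,1,0]] := by decide

-- A's list-based apply_s3_to_index agrees with B's arithmetic action
lemma applyS3_eq_s3Act : ∀ p ∈ perms6, ∀ idx : Int,
    applyS3 idx wittGroups p = s3Act p idx := by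
  intro p hp idx
  by_cases h : 1 ≤ idx ∧ idx ≤ 15
  · rw [perms6_eq] at hp
    obtain ⟨h1, h2⟩ := h
    fin_cases hp <;> (interval_cases idx <;> decide)
  · by_cases h0 : idx = 0
    · subst h0; simp [applyS3, s3Act]
    · have hA : applyS3 idx wittGroups p = idx := by
        simp only [applyS3, if_neg h0]
        rw [show PySem.List.enumerate wittGroups 0
            = [(0, [1,2,3,4,5]), (1, [6,7,8,9,10]), (2, [11,12,13,14,15])] from by decide]
        simp only [applyS3Aux]
        rw [if_neg, if_neg, if_neg]
        · simp; omega
        · simp; omega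
        · simp; omega
      rw [hA]
      simp only [s3Act, if_neg h]

-- composition of two label permutations
def comp3 (p q : List Int) : List Int := q.map (fun g => PySem.List.pyGetD p g 0)

lemma comp3_closed : ∀ p ∈ perms6, ∀ q ∈ perms6, comp3 p q ∈ perms6 := by decide

lemma s3Act_id : ∀ idx : Int, s3Act [0,1,2] idx = idx := by
  intro idx
  by_cases h : 1 ≤ idx ∧ idx ≤ 15
  · obtain ⟨h1, h2⟩ := h; interval_cases idx <;> decide
  · simp only [s3Act, if_neg h]

lemma s3Act_comp : ∀ p ∈ perms6, ∀ q ∈ perms6, ∀ idx : Int,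
    s3Act p (s3Act q idx) = s3Act (comp3 p q) idx := by
  rw [perms6_eq]
  intro p hp q hq idx
  by_cases h : 1 ≤ idx ∧ idx ≤ 15
  · obtain ⟨h1, h2⟩ := h
    fin_cases hp <;> fin_cases hq <;> (interval_cases idx <;> decide)
  · have hq' : s3Act q idx = idx := by simp only [s3Act, if_neg h]
    rw [hq']
    have hp' : s3Act p idx = idx := by simp only [s3Act, if_neg h]
    rw [hp']
    simp only [s3Act, if_neg h]

lemma s3Act_inv : ∀ q ∈ perms6, ∃ q' ∈ perms6, ∀ idx : Int,
    s3Act q' (s3Act q idx) = idx := by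
  intro q hq
  have hex : ∃ q' ∈ perms6, comp3 q' q = [0,1,2] := by
    rw [perms6_eq] at hq ⊢
    fin_cases hq <;> decide
  obtain ⟨q', hq', hc⟩ := hex
  exact ⟨q', hq', fun idx => by rw [s3Act_comp q' hq' q hq, hc, s3Act_id]⟩

-- lifting to triples
lemma mem_s3Images (s t : Int × Int × Int) :
    s ∈ s3Images t ↔ ∃ p ∈ perms6, s = (s3Act p t.1, s3Act p t.2.1, s3Act p t.2.2) := by
  simp [s3Images, List.mem_map, eq_comm]

lemma s3Images_trans {x s t : Int × Int × Int} (hx : x ∈ s3Images s)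
    (hs : s ∈ s3Images t) : x ∈ s3Images t := by
  rw [mem_s3Images] at *
  obtain ⟨p, hp, rfl⟩ := hx
  obtain ⟨q, hq, rfl⟩ := hs
  exact ⟨comp3 p q, comp3_closed p hp q hq,
    by simp [s3Act_comp p hp q hq]⟩

lemma s3Images_symm {s t : Int × Int × Int} (h : s ∈ s3Images t) : t ∈ s3Images s := by
  rw [mem_s3Images] at *
  obtain ⟨q, hq, rfl⟩ := h
  obtain ⟨q', hq', hinv⟩ := s3Act_inv q hq
  exact ⟨q', hq', by simp [hinv]⟩

-- order facts about lexLt3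
lemma lexLt3_asymm_eq {a b : Int × Int × Int}
    (h1 : lexLt3 a b = false) (h2 : lexLt3 b a = false) : a = b := by
  obtain ⟨a1, a2, a3⟩ := a; obtain ⟨b1, b2, b3⟩ := b
  simp [lexLt3] at h1 h2
  have : a1 = b1 ∧ a2 = b2 ∧ a3 = b3 := by omega
  simp [this.1, this.2.1, this.2.2]

lemma lexLt3_lt_trans {a b c : Int × Int × Int}
    (h1 : lexLt3 a b = true) (h2 : lexLt3 b c = true) : lexLt3 a c = true := by
  obtain ⟨a1, a2, a3⟩ := a; obtain ⟨b1, b2, b3⟩ := b; obtain ⟨c1, c2, c3⟩ := c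
  simp [lexLt3] at *; omega

lemma lexLt3_le_lt_trans {a b c : Int × Int × Int}
    (h1 : lexLt3 b a = false) (h2 : lexLt3 b c = true) : lexLt3 a c = true := by
  obtain ⟨a1, a2, a3⟩ := a; obtain ⟨b1, b2, b3⟩ := b; obtain ⟨c1, c2, c3⟩ := c
  simp [lexLt3] at *; omega

-- min facts
lemma pyMin3_mem : ∀ (l : List (Int × Int × Int)) (x : Int × Int × Int),
    pyMin3 x l ∈ x :: l := by
  intro l
  induction l with
  | nil => intro x; simp [pyMin3]
  | cons y l ih =>
    intro x
    show pyMin3 (if lexLt3 y x then y else x) l ∈ x :: y :: l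
    have h := ih (if lexLt3 y x then y else x)
    rw [List.mem_cons] at h
    rcases h with h | h
    · rw [h]; split <;> simp
    · simp [h]

lemma pyMin3_min : ∀ (l : List (Int × Int × Int)) (x : Int × Int × Int),
    ∀ z ∈ x :: l, lexLt3 z (pyMin3 x l) = false := by
  intro l
  induction l with
  | nil =>
    intro x z hz
    simp at hz; subst hz
    show lexLt3 z z = false
    obtain ⟨a1, a2, a3⟩ := z; simp [lexLt3]
  | cons y l ih =>
    intro x z hz
    show lexLt3 z (pyMin3 (if lexLt3 y x then y else x) l) = false
    set x' := if lexLt3 y x then y else x with hx'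
    have hmle : lexLt3 x' (pyMin3 x' l) = false := ih x' x' (by simp)
    have hxle : lexLt3 x (pyMin3 x' l) = false := by
      by_cases hyx : lexLt3 y x = true
      · simp [hx', hyx] at hmle ⊢
        by_contra hc
        simp at hc
        have := lexLt3_lt_trans hyx hc
        simp [this] at hmle
      · simp at hyx; simp [hx', hyx] at hmle ⊢; exact hmle
    have hyle : lexLt3 y (pyMin3 x' l) = false := by
      by_cases hyx : lexLt3 y x = true
      · simp [hx', hyx] at hmle ⊢; exact hmle
      · simp at hyx; simp [hx', hyx] at hmle ⊢
        by_contra hc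
        simp at hc
        have := lexLt3_le_lt_trans hyx hc
        simp [this] at hmle
    rw [List.mem_cons, List.mem_cons] at hz
    rcases hz with rfl | rfl | hz
    · exact hxle
    · exact hyle
    · exact ih x' z (by simp [hz])

lemma s3Images_ne_nil (t : Int × Int × Int) : s3Images t ≠ [] := by
  intro h
  have := congrArg List.length h
  simp [s3Images, perms6_eq] at this

lemma canonOf_mem (t : Int × Int × Int) : canonOf t ∈ s3Images t := by
  unfold canonOf
  cases himg : s3Images t with
  | nil => exact absurd himg (s3Images_ne_nil t)
  | cons x l => exact pyMin3_mem l x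

lemma canonOf_min (t : Int × Int × Int) :
    ∀ z ∈ s3Images t, lexLt3 z (canonOf t) = false := by
  unfold canonOf
  cases himg : s3Images t with
  | nil => exact absurd himg (s3Images_ne_nil t)
  | cons x l => exact pyMin3_min l x

-- the orbit characterisation: shared canonical form = same orbit
lemma canonOf_eq_iff (s t : Int × Int × Int) :
    canonOf s = canonOf t ↔ s ∈ s3Images t := by
  constructor
  · intro h
    have hc : canonOf s ∈ s3Images t := h ▸ canonOf_mem t
    exact s3Images_trans (s3Images_symm (canonOf_mem s)) hc
  · intro h
    have hext : ∀ x, x ∈ s3Images s ↔ x ∈ s3Images t :=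
      fun x => ⟨fun hx => s3Images_trans hx h,
                fun hx => s3Images_trans hx (s3Images_symm h)⟩
    have h1 : lexLt3 (canonOf s) (canonOf t) = false :=
      canonOf_min t _ ((hext _).1 (canonOf_mem s))
    have h2 : lexLt3 (canonOf t) (canonOf s) = false :=
      canonOf_min s _ ((hext _).2 (canonOf_mem t))
    exact lexLt3_asymm_eq h1 h2

-- membership in A's inner visited-building fold
lemma mem_innerFold (S : PySem.Set (Int × Int × Int)) (t : Int × Int × Int) :
    ∀ (ps : List (List Int)), (∀ p ∈ ps, p ∈ perms6) →
    ∀ (v : PySem.Set (Int × Int × Int)) (s : Int × Int × Int),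
    (s ∈ ps.foldl (fun v p =>
      let tp := (applyS3 t.1 wittGroups p, applyS3 t.2.1 wittGroups p,
                 applyS3 t.2.2 wittGroups p)
      if PySem.Set.contains S tp then PySem.Set.add v tp else v) v
      ↔ s ∈ v ∨ (s ∈ S ∧ ∃ p ∈ ps, s = (s3Act p t.1, s3Act p t.2.1, s3Act p t.2.2))) := by
  intro ps
  induction ps with
  | nil => intro _ v s; simp
  | cons p ps ih =>
    intro hps v s
    have hp : p ∈ perms6 := hps p (by simp)
    have hps' : ∀ r ∈ ps, r ∈ perms6 := fun r hr => hps r (by simp [hr])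
    rw [List.foldl_cons, ih hps']
    rw [applyS3_eq_s3Act p hp t.1, applyS3_eq_s3Act p hp t.2.1, applyS3_eq_s3Act p hp t.2.2]
    by_cases hc : PySem.Set.contains S (s3Act p t.1, s3Act p t.2.1, s3Act p t.2.2) = true
    · have hmem : (s3Act p t.1, s3Act p t.2.1, s3Act p t.2.2) ∈ S :=
        (PySem.Set.contains_iff _ _).1 hc
      simp only [hc, if_true, PySem.Set.mem_add, List.mem_cons]
      constructor
      · rintro (((hv | rfl) | ⟨hS, r, hr, rfl⟩))
        · exact Or.inl hv
        · exact Or.inr ⟨hmem, p, Or.inl rfl, rfl⟩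
        · exact Or.inr ⟨hS, r, Or.inr hr, rfl⟩
      · rintro (hv | ⟨hS, r, hr | hr, rfl⟩)
        · exact Or.inl (Or.inl hv)
        · subst hr; exact Or.inl (Or.inr rfl)
        · exact Or.inr ⟨hS, r, hr, rfl⟩
    · have hnmem : (s3Act p t.1, s3Act p t.2.1, s3Act p t.2.2) ∉ S := by
        intro hm; exact hc ((PySem.Set.contains_iff _ _).2 hm)
      simp only [hc, List.mem_cons]
      constructor
      · rintro (hv | ⟨hS, r, hr, rfl⟩)
        · exact Or.inl hv
        · exact Or.inr ⟨hS, r, Or.inr hr, rfl⟩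
      · rintro (hv | ⟨hS, r, hr | hr, rfl⟩)
        · exact Or.inl hv
        · subst hr; exact absurd hS hnmem
        · exact Or.inr ⟨hS, r, hr, rfl⟩

-- the main loop invariant: A's count advances exactly when B's canonical set grows
lemma loop_eq (S : PySem.Set (Int × Int × Int)) :
    ∀ (ts : List (Int × Int × Int)) (v : PySem.Set (Int × Int × Int)) (c : Int)
      (cs : PySem.Set (Int × Int × Int)),
    (∀ t ∈ ts, t ∈ S) →
    (∀ s, s ∈ S → (s ∈ v ↔ canonOf s ∈ cs)) →
    (ts.foldl (stepA S) (v, c)).2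
      = c + (((ts.foldl stepB cs).length : Int) - (cs.length : Int)) := by
  intro ts
  induction ts with
  | nil => intro v c cs _ _; simp
  | cons t ts ih =>
    intro v c cs hts hinv
    have htS : t ∈ S := hts t (by simp)
    have hts' : ∀ t' ∈ ts, t' ∈ S := fun t' ht' => hts t' (by simp [ht'])
    rw [List.foldl_cons, List.foldl_cons]
    by_cases hv : PySem.Set.contains v t = true
    · have htv : t ∈ v := (PySem.Set.contains_iff _ _).1 hv
      have hcan : canonOf t ∈ cs := (hinv t htS).1 htv
      have hA : stepA S (v, c) t = (v, c) := by simp [stepA, htv]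
      have hB : stepB cs t = cs := by
        simp [stepB, PySem.Set.add_of_mem hcan]
      rw [hA, hB]
      exact ih v c cs hts' hinv
    · have htv : t ∉ v := fun hm => hv ((PySem.Set.contains_iff _ _).2 hm)
      have hcan : canonOf t ∉ cs := fun hm => htv ((hinv t htS).2 hm)
      have hA : stepA S (v, c) t
          = (perms6.foldl (fun v p =>
              let tp := (applyS3 t.1 wittGroups p, applyS3 t.2.1 wittGroups p,
                         applyS3 t.2.2 wittGroups p)
              if PySem.Set.contains S tp then PySem.Set.add v tp else v) v, c + 1) := by
        simp [stepA, htv]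
      have hB : stepB cs t = cs ++ [canonOf t] := by
        simp [stepB, PySem.Set.add_of_not_mem hcan]
      rw [hA, hB]
      set v' := perms6.foldl (fun v p =>
          let tp := (applyS3 t.1 wittGroups p, applyS3 t.2.1 wittGroups p,
                     applyS3 t.2.2 wittGroups p)
          if PySem.Set.contains S tp then PySem.Set.add v tp else v) v with hv'
      have hinv' : ∀ s, s ∈ S → (s ∈ v' ↔ canonOf s ∈ cs ++ [canonOf t]) := by
        intro s hs
        rw [hv', mem_innerFold S t perms6 (fun p hp => hp) v s]
        have himg : (∃ p ∈ perms6, s = (s3Act p t.1, s3Act p t.2.1, s3Act p t.2.2))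
            ↔ s ∈ s3Images t := (mem_s3Images s t).symm
        rw [List.mem_append, List.mem_singleton, ← hinv s hs]
        constructor
        · rintro (hsv | ⟨_, hex⟩)
          · exact Or.inl hsv
          · exact Or.inr ((canonOf_eq_iff s t).2 (himg.1 hex))
        · rintro (hsv | hce)
          · exact Or.inl hsv
          · exact Or.inr ⟨hs, himg.2 ((canonOf_eq_iff s t).1 hce)⟩
      rw [ih v' (c + 1) (cs ++ [canonOf t]) hts' hinv']
      have hlen : ((cs ++ [canonOf t]).length : Int) = (cs.length : Int) + 1 := by
        simp
      omega

-- ===== VERDICT (by name: the statement is the Claim_ definition above) =====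
theorem count_witt_triple_orbits_labeled_spec : Claim_equal_count_witt_triple_orbits_labeled := by
  intro table _ _
  unfold Spec_count_witt_triple_orbits_labeled
  unfold count_witt_triple_orbits_labeled count_witt_triple_orbits_labeled_alt
  show (List.foldl (stepA (PySem.Set.ofList (findWittTriples table)))
      (PySem.Set.empty, 0) (findWittTriples table)).2
    = PySem.Set.len (List.foldl stepB PySem.Set.empty (findWittTriples table))
  rw [loop_eq (PySem.Set.ofList (findWittTriples table)) (findWittTriples table)
      PySem.Set.empty 0 PySem.Set.empty
      (fun t ht => (PySem.Set.mem_ofList _ _).2 ht)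
      (fun s _ => by simp [PySem.Set.empty])]
  simp [PySem.Set.len, PySem.Set.empty]
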